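-- pv_equiv track=rewrite | github.com/scottrogowski/code2flow | lib/model.py | _encode_source
-- ===== SOURCE A (Python) =====
-- def _encode_source(raw_source):
--     char_list = []
--     i = 0
--     for line_number, row in enumerate(raw_source.split('\n')):
--         for c in row:
--             char_list.append((c, i, line_number + 1))
--             i += 1
--         char_list.append(('\n', i, line_number + 1))
--         i += 1
--     return char_list
-- ===== SOURCE B (Python) =====
-- def _encode_source(raw_source):
--     char_list = []
--     line_number = 1
--     for i, c in enumerate(raw_source):
--         char_list.append((c, i, line_number))
--         if c == '\n':
--             line_number += 1
--     char_list.append(('\n', len(raw_source), line_number))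
--     return char_list
-- ===== Notes on version B (the rewrite author's own statement) =====
-- stated objective: simpler
-- what changed: Replaced the split-into-lines plus nested per-line loop by a single flat enumerate pass over the raw string that tracks the line number inline and appends the trailing synthetic newline once at the end.
import Mathlib
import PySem

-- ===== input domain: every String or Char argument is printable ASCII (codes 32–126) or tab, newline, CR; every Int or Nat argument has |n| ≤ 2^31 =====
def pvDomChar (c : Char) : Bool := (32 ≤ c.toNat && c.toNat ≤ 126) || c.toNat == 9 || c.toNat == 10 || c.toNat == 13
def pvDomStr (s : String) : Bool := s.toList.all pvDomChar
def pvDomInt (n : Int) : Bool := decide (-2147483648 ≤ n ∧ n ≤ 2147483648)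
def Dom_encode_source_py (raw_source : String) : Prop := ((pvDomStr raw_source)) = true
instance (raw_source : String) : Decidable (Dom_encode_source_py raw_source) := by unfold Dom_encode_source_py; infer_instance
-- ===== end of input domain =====

-- B replaces A's split-into-lines + nested per-line loop by one flat pass over the
-- characters that tracks the line number inline (objective: simpler decomposition).

-- ===== PORT A =====
-- A: rows = raw_source.split('\n'); nested loop over enumerate(rows) and each row's
-- characters, appending (c, i, line_number+1) and a '\n' entry after each row.
def encode_source_py (raw_source : String) : List (String × Int × Int) :=
  let rows : List String := (PySem.Str.split? raw_source "\n").getD []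
  let res :=
    (PySem.List.enumerate rows).foldl
      (fun (st : List (String × Int × Int) × Int) (p : Int × String) =>
        let line_number := p.1
        let inner :=
          p.2.toList.foldl
            (fun (st2 : List (String × Int × Int) × Int) (c : Char) =>
              (st2.1 ++ [(String.ofList [c], st2.2, line_number + 1)], st2.2 + 1))
            st
        (inner.1 ++ [("\n", inner.2, line_number + 1)], inner.2 + 1))
      ([], 0)
  res.1

-- ===== PORT B =====
-- B: single enumerate pass over the characters; line_number starts at 1 and is
-- bumped after each '\n'; one synthetic trailing '\n' entry appended at the end.
def encode_source_py_alt (raw_source : String) : List (String × Int × Int) :=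
  let res :=
    (PySem.List.enumerate raw_source.toList).foldl
      (fun (st : List (String × Int × Int) × Int) (p : Int × Char) =>
        (st.1 ++ [(String.ofList [p.2], p.1, st.2)],
         if p.2 = '\n' then st.2 + 1 else st.2))
      ([], 1)
  res.1 ++ [("\n", (raw_source.toList.length : Int), res.2)]

-- ===== PRECONDITION & SPEC =====
def Spec_encode_source_py (raw_source : String) (out : List (String × Int × Int)) : Prop := out = encode_source_py_alt raw_source
instance (raw_source : String) (out : List (String × Int × Int)) : Decidable (Spec_encode_source_py raw_source out) := by unfold Spec_encode_source_py; infer_instance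

-- ===== CLAIM (what is proved, stated in full; the proofs are below) =====
def Claim_equal_encode_source_py : Prop := ∀ (raw_source : String), Dom_encode_source_py raw_source → Spec_encode_source_py raw_source (encode_source_py raw_source)

-- ===== LEMMAS AND PROOFS =====

-- reference split on '\n' (always returns a nonempty list of rows)
def pvSplitNl : List Char → List (List Char)
  | [] => [[]]
  | c :: r =>
    if c = '\n' then [] :: pvSplitNl r
    else
      match pvSplitNl r with
      | [] => [[c]]
      | x :: xs => (c :: x) :: xs

-- reference flat annotation: rows, starting offset, starting line number
def pvFlat : List (List Char) → Int → Int → List (String × Int × Int)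
  | [], _, _ => []
  | [] :: rs, i, ln => ("\n", i, ln) :: pvFlat rs (i + 1) (ln + 1)
  | (c :: r) :: rs, i, ln => (String.ofList [c], i, ln) :: pvFlat (r :: rs) (i + 1) ln

-- reference form of B: chars, starting offset, starting line number
def pvScan : List Char → Int → Int → List (String × Int × Int)
  | [], i, ln => [("\n", i, ln)]
  | c :: r, i, ln =>
    if c = '\n' then ("\n", i, ln) :: pvScan r (i + 1) (ln + 1)
    else (String.ofList [c], i, ln) :: pvScan r (i + 1) ln

theorem pvSplitNl_ne_nil (l : List Char) : pvSplitNl l ≠ [] := by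
  cases l with
  | nil => simp [pvSplitNl]
  | cons c r =>
    simp only [pvSplitNl]
    split_ifs
    · simp
    · cases h : pvSplitNl r <;> simp

theorem splitOn_go_eq (l : List Char) : ∀ (fuel : Nat) (cur : List Char)
    (acc : List (List Char)), l.length < fuel →
    PySem.Chars.splitOn.go ['\n'] fuel l cur acc =
      acc.reverse ++
        (match pvSplitNl l with
         | [] => [cur.reverse]
         | x :: xs => (cur.reverse ++ x) :: xs) := by
  induction l with
  | nil =>
    intro fuel cur acc h
    match fuel with
    | f + 1 => simp [PySem.Chars.splitOn.go, pvSplitNl]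
  | cons c r ih =>
    intro fuel cur acc h
    match fuel with
    | f + 1 =>
      simp only [PySem.Chars.splitOn.go]
      by_cases hc : c = '\n'
      · have hpre : List.isPrefixOf ['\n'] (c :: r) = true := by
          simp [List.isPrefixOf, hc]
        rw [if_pos hpre]
        rw [show List.drop (['\n'].length) (c :: r) = r from rfl]
        have hr : r.length < f := by simpa using Nat.lt_of_succ_lt_succ h
        rw [ih f [] (cur.reverse :: acc) hr]
        rcases hx : pvSplitNl r with _ | ⟨x, xs⟩
        · exact absurd hx (pvSplitNl_ne_nil r)
        · simp [pvSplitNl, hc, hx]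
      · have hpre : List.isPrefixOf ['\n'] (c :: r) = false := by
          simp [List.isPrefixOf]
          exact fun hcc => absurd hcc.symm hc
        rw [if_neg (by simp [hpre])]
        have hr : r.length < f := by simpa using Nat.lt_of_succ_lt_succ h
        rw [ih f (c :: cur) acc hr]
        rcases hx : pvSplitNl r with _ | ⟨x, xs⟩
        · exact absurd hx (pvSplitNl_ne_nil r)
        · simp [pvSplitNl, hc, hx, List.append_assoc]

theorem splitOn_eq (cs : List Char) :
    PySem.Chars.splitOn cs ['\n'] = pvSplitNl cs := by
  unfold PySem.Chars.splitOn
  rw [splitOn_go_eq cs (cs.length + 1) [] [] (Nat.lt_succ_self _)]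
  rcases hx : pvSplitNl cs with _ | ⟨x, xs⟩
  · exact absurd hx (pvSplitNl_ne_nil cs)
  · simp

-- pvFlat of a split = flat scan
theorem pvFlat_splitNl (cs : List Char) : ∀ (i ln : Int),
    pvFlat (pvSplitNl cs) i ln = pvScan cs i ln := by
  induction cs with
  | nil => intro i ln; simp [pvSplitNl, pvFlat, pvScan]
  | cons c r ih =>
    intro i ln
    by_cases hc : c = '\n'
    · simp [pvSplitNl, hc, pvFlat, pvScan, ih]
    · rcases hx : pvSplitNl r with _ | ⟨x, xs⟩
      · exact absurd hx (pvSplitNl_ne_nil r)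
      · have h1 : pvSplitNl (c :: r) = (c :: x) :: xs := by
          simp [pvSplitNl, hc, hx]
        rw [h1]
        simp only [pvFlat]
        rw [← hx, ih]
        simp [pvScan, hc]

-- inner loop of port A over one row's characters
theorem innerFold_eq (row : List Char) : ∀ (acc : List (String × Int × Int))
    (i ln : Int),
    row.foldl
      (fun (st2 : List (String × Int × Int) × Int) (c : Char) =>
        (st2.1 ++ [(String.ofList [c], st2.2, ln)], st2.2 + 1)) (acc, i) =
    (acc ++ ((PySem.List.enumerate row i).map (fun p => (String.ofList [p.2], p.1, ln))),
     i + row.length) := by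
  induction row with
  | nil => intro acc i ln; simp [PySem.List.enumerate_nil]
  | cons c r ih =>
    intro acc i ln
    simp only [List.foldl_cons, ih, PySem.List.enumerate_cons, List.map_cons,
      List.length_cons, List.append_assoc, List.singleton_append]
    rw [Prod.mk.injEq]
    exact ⟨rfl, by push_cast; ring⟩

-- pvFlat row-at-a-time characterization
theorem pvFlat_cons (r : List Char) : ∀ (rs : List (List Char)) (i ln : Int),
    pvFlat (r :: rs) i ln =
      ((PySem.List.enumerate r i).map (fun p => (String.ofList [p.2], p.1, ln))) ++
        ("\n", i + r.length, ln) :: pvFlat rs (i + r.length + 1) (ln + 1) := by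
  induction r with
  | nil => intro rs i ln; simp [pvFlat, PySem.List.enumerate_nil]
  | cons c r' ih =>
    intro rs i ln
    simp only [pvFlat, ih, PySem.List.enumerate_cons, List.map_cons, List.length_cons,
      List.cons_append]
    push_cast
    have h1 : i + ((r'.length : Int) + 1) = i + 1 + r'.length := by ring
    rw [h1]

-- outer loop of port A = pvFlat
theorem outerFold_eq (rows : List String) : ∀ (n : Int)
    (acc : List (String × Int × Int)) (i : Int),
    ((PySem.List.enumerate rows n).foldl
      (fun (st : List (String × Int × Int) × Int) (p : Int × String) =>
        let line_number := p.1
        let inner :=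
          p.2.toList.foldl
            (fun (st2 : List (String × Int × Int) × Int) (c : Char) =>
              (st2.1 ++ [(String.ofList [c], st2.2, line_number + 1)], st2.2 + 1))
            st
        (inner.1 ++ [("\n", inner.2, line_number + 1)], inner.2 + 1))
      (acc, i)).1 =
    acc ++ pvFlat (rows.map String.toList) i (n + 1) := by
  induction rows with
  | nil => intro n acc i; simp [PySem.List.enumerate_nil, pvFlat]
  | cons row rs ih =>
    intro n acc i
    simp only [PySem.List.enumerate_cons, List.foldl_cons, List.map_cons]
    rw [innerFold_eq]
    simp only
    rw [ih, pvFlat_cons]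
    simp only [List.append_assoc, List.cons_append, List.nil_append]

-- final line number after scanning the characters
def pvLine : List Char → Int → Int
  | [], ln => ln
  | c :: r, ln => pvLine r (if c = '\n' then ln + 1 else ln)

theorem pvScan_ne_nil (cs : List Char) (i ln : Int) : pvScan cs i ln ≠ [] := by
  cases cs with
  | nil => simp [pvScan]
  | cons c r => simp only [pvScan]; split_ifs <;> simp

-- loop of port B = pvScan minus the trailing entry, with the final line number
theorem bFold_eq (cs : List Char) : ∀ (n : Int)
    (acc : List (String × Int × Int)) (ln : Int),
    (PySem.List.enumerate cs n).foldl
      (fun (st : List (String × Int × Int) × Int) (p : Int × Char) =>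
        (st.1 ++ [(String.ofList [p.2], p.1, st.2)],
         if p.2 = '\n' then st.2 + 1 else st.2))
      (acc, ln) =
    ((acc ++ (pvScan cs n ln).dropLast), pvLine cs ln) := by
  induction cs with
  | nil => intro n acc ln; simp [PySem.List.enumerate_nil, pvScan, pvLine]
  | cons c r ih =>
    intro n acc ln
    simp only [PySem.List.enumerate_cons, List.foldl_cons]
    by_cases hc : c = '\n'
    · rw [if_pos hc, ih]
      have hne := pvScan_ne_nil r (n + 1) (ln + 1)
      simp [pvScan, pvLine, hc, List.dropLast_cons_of_ne_nil hne]
    · rw [if_neg hc, ih]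
      have hne := pvScan_ne_nil r (n + 1) ln
      simp [pvScan, pvLine, hc, List.dropLast_cons_of_ne_nil hne]

-- pvScan reassembles from its dropLast plus the trailing synthetic entry
theorem pvScan_last (cs : List Char) : ∀ (i ln : Int),
    (pvScan cs i ln).dropLast ++ [("\n", i + cs.length, pvLine cs ln)] =
    pvScan cs i ln := by
  induction cs with
  | nil => intro i ln; simp [pvScan, pvLine]
  | cons c r ih =>
    intro i ln
    by_cases hc : c = '\n'
    · have hne := pvScan_ne_nil r (i + 1) (ln + 1)
      simp only [pvScan, pvLine, hc, List.length_cons,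
        List.dropLast_cons_of_ne_nil hne, ite_true, List.cons_append]
      congr 1
      push_cast
      rw [show i + ((r.length : Int) + 1) = i + 1 + r.length from by ring]
      exact ih (i + 1) (ln + 1)
    · have hne := pvScan_ne_nil r (i + 1) ln
      simp only [pvScan, pvLine, hc, List.length_cons,
        List.dropLast_cons_of_ne_nil hne, ite_false, List.cons_append]
      congr 1
      push_cast
      rw [show i + ((r.length : Int) + 1) = i + 1 + r.length from by ring]
      exact ih (i + 1) ln

theorem toList_ofList_map (l : List (List Char)) :
    (l.map String.ofList).map String.toList = l := by
  induction l with
  | nil => rfl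
  | cons x xs ihx => simp [ihx]

theorem split?_rows (s : String) :
    ((PySem.Str.split? s "\n").getD []).map String.toList = pvSplitNl s.toList := by
  rw [PySem.Str.split?]
  have h : PySem.Chars.split? s.toList "\n".toList =
      some (PySem.Chars.splitOn s.toList ['\n']) := by
    simp [PySem.Chars.split?]
  rw [show "\n".toList = ['\n'] from rfl] at *
  rw [h]
  simp only [Option.map_some, Option.getD_some]
  rw [splitOn_eq]
  exact toList_ofList_map _

-- ===== VERDICT (by name: the statement is the Claim_ definition above) =====
theorem encode_source_py_spec : Claim_equal_encode_source_py := by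
  intro s _
  unfold Spec_encode_source_py encode_source_py encode_source_py_alt
  simp only
  rw [outerFold_eq, bFold_eq]
  rw [split?_rows, pvFlat_splitNl]
  simp only [List.nil_append, Int.zero_add]
  have := pvScan_last s.toList 0 1
  rw [show ((0 : Int) + (s.toList.length : Int)) = (s.toList.length : Int) by ring] at this
  exact this.symm
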